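-- pv_equiv track=rewrite | github.com/parit/swiss-cricket-stats | scorecards/src/parser.py | label_anchored_parse
-- ===== SOURCE A (Python) =====
-- LABELS = {"Ground", "Date", "Match Result", "Toss", "Total", "Result"}
--
-- def label_anchored_parse(lines: list[str]) -> dict:
--     """Walk lines top-to-bottom; collect value lines under known labels."""
--     result = {}
--     current_label = None
--     current_values = []
--
--     for line in lines:
--         stripped = line.strip()
--         if not stripped:
--             continue
--         if stripped in LABELS:
--             if current_label and current_label not in {"Match Result", "Toss"}:
--                 result[current_label] = current_values[:]
--             current_label = stripped
--             current_values = []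
--         else:
--             inline = next((lbl for lbl in LABELS if stripped.startswith(lbl + " ")), None)
--             if inline:
--                 if current_label and current_label not in {"Match Result", "Toss"}:
--                     result[current_label] = current_values[:]
--                 current_label = inline
--                 current_values = [stripped[len(inline):].strip()]
--             elif current_label:
--                 current_values.append(stripped)
--
--     if current_label and current_label not in {"Match Result", "Toss"}:
--         result[current_label] = current_values[:]
--
--     return result
-- ===== SOURCE B (Python) =====
-- LABELS = {"Ground", "Date", "Match Result", "Toss", "Total", "Result"}
--
-- def label_anchored_parse(lines: list[str]) -> dict:
--     """Two passes: group lines into (label, values) segments, then build the dict."""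
--     # pass 1: segment the input
--     segments = []
--     for line in lines:
--         stripped = line.strip()
--         if not stripped:
--             continue
--         if stripped in LABELS:
--             segments.append((stripped, []))
--         else:
--             inline = next((lbl for lbl in LABELS if stripped.startswith(lbl + " ")), None)
--             if inline:
--                 segments.append((inline, [stripped[len(inline):].strip()]))
--             elif segments:
--                 segments[-1][1].append(stripped)
--     # pass 2: build the result, skipping non-stored labels; later duplicates overwrite
--     result = {}
--     for label, values in segments:
--         if label not in {"Match Result", "Toss"}:
--             result[label] = values
--     return result
-- ===== Notes on version B (the rewrite author's own statement) =====
-- stated objective: alternative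
-- what changed: B separates the work into two passes - first grouping the lines into a list of (label, values) segments, then building the dict from the segments - instead of A's single loop that interleaves dict writes at three flush sites with the scan state (current_label/current_values).
import Mathlib
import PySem

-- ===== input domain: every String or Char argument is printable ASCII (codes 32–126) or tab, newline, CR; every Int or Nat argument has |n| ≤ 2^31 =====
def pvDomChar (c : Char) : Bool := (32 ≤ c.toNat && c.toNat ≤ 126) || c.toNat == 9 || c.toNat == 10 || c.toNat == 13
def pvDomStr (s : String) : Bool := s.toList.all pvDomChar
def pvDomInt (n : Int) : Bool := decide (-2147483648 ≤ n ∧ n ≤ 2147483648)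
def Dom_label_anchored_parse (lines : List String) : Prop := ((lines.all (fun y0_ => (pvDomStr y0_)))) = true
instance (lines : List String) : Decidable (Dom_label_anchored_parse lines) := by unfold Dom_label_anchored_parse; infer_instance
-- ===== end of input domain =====

-- B replaces A's single loop with interleaved dict writes by a two-pass decomposition
-- (segment the lines, then build the dict from the segments); objective: alternative.

-- Helpers shared verbatim by both Pythons (LABELS, the strip/membership/inline tests):
-- pvLabels pairs each label with the literal label+" " (Python's `lbl + " "` precomputed,
-- since Lean's String.append is kernel-opaque).  At most one label can prefix-match a
-- stripped line (no label is another label plus a space), so list order is irrelevant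
-- and the port of Python's set iteration is exact.
def pvLabels : List (String × String) :=
  [("Ground", "Ground "), ("Date", "Date "), ("Match Result", "Match Result "),
   ("Toss", "Toss "), ("Total", "Total "), ("Result", "Result ")]

def pvIsLabel (s : String) : Bool := (pvLabels.map (·.1)).contains s

def pvFindInline (s : String) : Option String :=
  (pvLabels.find? (fun p => PySem.Str.startswith s p.2)).map (·.1)

-- `stripped[len(inline):].strip()`
def pvInlineVal (stripped lbl : String) : String :=
  PySem.Str.strip (PySem.Str.slice stripped (some (PySem.Str.len lbl)) none)

-- `label not in {"Match Result", "Toss"}` (negated)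
def pvForbidden (l : String) : Bool := l == "Match Result" || l == "Toss"

-- ===== PORT A =====
-- A's flush site: `if current_label and current_label not in {...}: result[current_label] = current_values[:]`
-- (current_label is None or one of the nonempty LABELS, so Python truthiness = `some`).
def pvFlushA (d : PySem.Dict String (List String)) (cur : Option String)
    (vals : List String) : PySem.Dict String (List String) :=
  match cur with
  | none => d
  | some l => if pvForbidden l then d else d.insert l vals

def pvStepA (st : PySem.Dict String (List String) × Option String × List String)
    (line : String) : PySem.Dict String (List String) × Option String × List String :=
  let stripped := PySem.Str.strip line
  if stripped == "" then st
  else if pvIsLabel stripped then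
    (pvFlushA st.1 st.2.1 st.2.2, some stripped, [])
  else
    match pvFindInline stripped with
    | some lbl => (pvFlushA st.1 st.2.1 st.2.2, some lbl, [pvInlineVal stripped lbl])
    | none =>
      match st.2.1 with
      | some _ => (st.1, st.2.1, st.2.2 ++ [stripped])
      | none => st

def label_anchored_parse (lines : List String) : List (String × List String) :=
  let st := lines.foldl pvStepA (PySem.Dict.empty, none, [])
  (pvFlushA st.1 st.2.1 st.2.2).items

-- ===== PORT B =====
-- Pass 1 of Source B.  Python appends segments and mutates segments[-1]; here the segment
-- list is accumulated in REVERSE (cons a new segment, rebuild the head), and reversed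
-- before pass 2 — the produced segment list is exactly Source B's `segments`.
def pvStepB (rsegs : List (String × List String)) (line : String) :
    List (String × List String) :=
  let stripped := PySem.Str.strip line
  if stripped == "" then rsegs
  else if pvIsLabel stripped then (stripped, []) :: rsegs
  else
    match pvFindInline stripped with
    | some lbl => (lbl, [pvInlineVal stripped lbl]) :: rsegs
    | none =>
      match rsegs with
      | [] => []
      | (l, vs) :: t => (l, vs ++ [stripped]) :: t

-- Pass 2 of Source B: build the dict from the segments in order.
def pvBuild (segs : List (String × List String)) : PySem.Dict String (List String) :=
  segs.foldl (fun d p => if pvForbidden p.1 then d else d.insert p.1 p.2) PySem.Dict.empty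

def label_anchored_parse_alt (lines : List String) : List (String × List String) :=
  (pvBuild (lines.foldl pvStepB []).reverse).items

-- ===== PRECONDITION & SPEC =====
def Spec_label_anchored_parse (lines : List String) (out : List (String × List String)) : Prop := out = label_anchored_parse_alt lines
instance (lines : List String) (out : List (String × List String)) : Decidable (Spec_label_anchored_parse lines out) := by unfold Spec_label_anchored_parse; infer_instance

-- ===== CLAIM (what is proved, stated in full; the proofs are below) =====
def Claim_equal_label_anchored_parse : Prop := ∀ (lines : List String), Dom_label_anchored_parse lines → Spec_label_anchored_parse lines (label_anchored_parse lines)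

-- ===== LEMMAS AND PROOFS =====

-- Invariant linking A's loop state (dict, current label, current values) to B's
-- reversed segment accumulator: the current segment is B's head, and A's dict is
-- pass 2 applied to the already-closed segments.
def pvInv (d : PySem.Dict String (List String)) (cur : Option String)
    (vals : List String) (rsegs : List (String × List String)) : Prop :=
  match cur with
  | none => d = PySem.Dict.empty ∧ vals = [] ∧ rsegs = []
  | some l => ∃ t, rsegs = (l, vals) :: t ∧ d = pvBuild t.reverse

-- pass 2 over one more (final) segment is exactly A's flush of that segment
lemma pvBuild_append (xs : List (String × List String)) (x : String × List String) :
    pvBuild (xs ++ [x]) = (if pvForbidden x.1 then pvBuild xs else (pvBuild xs).insert x.1 x.2) := by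
  simp [pvBuild, List.foldl_append]

-- flushing a state satisfying the invariant yields pass 2 of all segments so far
lemma pvFlush_inv (d : PySem.Dict String (List String)) (cur : Option String)
    (vals : List String) (rsegs : List (String × List String))
    (h : pvInv d cur vals rsegs) : pvFlushA d cur vals = pvBuild rsegs.reverse := by
  match cur with
  | none =>
    obtain ⟨hd, _, hr⟩ := h
    simp [pvFlushA, hd, hr, pvBuild]
  | some l =>
    obtain ⟨t, hr, hd⟩ := h
    subst hr hd
    simp [pvFlushA, pvBuild_append]

-- main loop correspondence: from any pair of states related by the invariant,
-- A's remaining loop + final flush equals pass 2 of B's remaining pass 1.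
lemma pvLoop_eq (lines : List String) :
    ∀ (d : PySem.Dict String (List String)) (cur : Option String)
      (vals : List String) (rsegs : List (String × List String)),
    pvInv d cur vals rsegs →
    (let st := lines.foldl pvStepA (d, cur, vals)
     pvFlushA st.1 st.2.1 st.2.2) = pvBuild (lines.foldl pvStepB rsegs).reverse := by
  induction lines with
  | nil =>
    intro d cur vals rsegs h
    simpa using pvFlush_inv d cur vals rsegs h
  | cons line rest ih =>
    intro d cur vals rsegs h
    simp only [List.foldl_cons]
    by_cases hempty : PySem.Str.strip line == ""
    · rw [show pvStepA (d, cur, vals) line = (d, cur, vals) by simp [pvStepA, hempty],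
          show pvStepB rsegs line = rsegs by simp [pvStepB, hempty]]
      exact ih d cur vals rsegs h
    · by_cases hlab : pvIsLabel (PySem.Str.strip line)
      · rw [show pvStepA (d, cur, vals) line
              = (pvFlushA d cur vals, some (PySem.Str.strip line), []) by
            simp [pvStepA, hempty, hlab],
            show pvStepB rsegs line = (PySem.Str.strip line, []) :: rsegs by
            simp [pvStepB, hempty, hlab]]
        exact ih _ _ _ _ ⟨rsegs, rfl, (pvFlush_inv d cur vals rsegs h).symm ▸ rfl⟩
      · cases hinl : pvFindInline (PySem.Str.strip line) with
        | some lbl =>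
          rw [show pvStepA (d, cur, vals) line
                = (pvFlushA d cur vals, some lbl, [pvInlineVal (PySem.Str.strip line) lbl]) by
              simp [pvStepA, hempty, hlab, hinl],
              show pvStepB rsegs line = (lbl, [pvInlineVal (PySem.Str.strip line) lbl]) :: rsegs by
              simp [pvStepB, hempty, hlab, hinl]]
          exact ih _ _ _ _ ⟨rsegs, rfl, (pvFlush_inv d cur vals rsegs h).symm ▸ rfl⟩
        | none =>
          match cur with
          | none =>
            obtain ⟨hd, hv, hr⟩ := h
            rw [show pvStepA (d, none, vals) line = (d, none, vals) by
                  simp [pvStepA, hempty, hlab, hinl],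
                show pvStepB rsegs line = rsegs by
                  simp [pvStepB, hempty, hlab, hinl, hr]]
            exact ih d none vals rsegs ⟨hd, hv, hr⟩
          | some l =>
            obtain ⟨t, hr, hd⟩ := h
            rw [show pvStepA (d, some l, vals) line
                  = (d, some l, vals ++ [PySem.Str.strip line]) by
                simp [pvStepA, hempty, hlab, hinl],
                show pvStepB rsegs line
                  = (l, vals ++ [PySem.Str.strip line]) :: t by
                simp [pvStepB, hempty, hlab, hinl, hr]]
            exact ih d (some l) (vals ++ [PySem.Str.strip line]) _ ⟨t, rfl, hd⟩

-- ===== VERDICT (by name: the statement is the Claim_ definition above) =====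
theorem label_anchored_parse_spec : Claim_equal_label_anchored_parse := by
  intro lines _
  unfold Spec_label_anchored_parse label_anchored_parse label_anchored_parse_alt
  have := pvLoop_eq lines PySem.Dict.empty none [] [] (by simp [pvInv])
  exact congrArg PySem.Dict.items this
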